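-- pv_equiv track=rewrite | github.com/zzhzz/MFGNNPreparation | merge.py | bfs
-- ===== SOURCE A (Python) =====
-- from collections import deque
--
-- def bfs(tr, num, tree_id):
--     q = deque([(0, 2)])  # (node_id, depth), the root node of block at depth 1
--     indexes, depths = [0] * (num-1), [0] * num
--     while q:
--         u, dep = q.popleft()
--         depths[u] = dep
--         for idx, v in enumerate(tr[u], 1):
--             indexes[v[0]] = idx
--             q.append((v[1], dep + 1))
--     if tree_id != -1:
--         indexes = indexes + [tree_id + 1]
--     return indexes, depths
-- ===== SOURCE B (Python) =====
-- def bfs(tr, num, tree_id):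
--     # Level-by-level frontier traversal: no deque, no per-node depth pairs.
--     indexes, depths = [0] * (num - 1), [0] * num
--     frontier, dep = [0], 2
--     while frontier:
--         nxt = []
--         for u in frontier:
--             depths[u] = dep
--             for idx, v in enumerate(tr[u], 1):
--                 indexes[v[0]] = idx
--                 nxt.append(v[1])
--         frontier, dep = nxt, dep + 1
--     if tree_id != -1:
--         indexes = indexes + [tree_id + 1]
--     return indexes, depths
-- ===== Notes on version B (the rewrite author's own statement) =====
-- stated objective: alternative
-- what changed: Replaces the deque of (node, depth) pairs by level-at-a-time frontier lists: an outer loop per depth with a scalar depth counter and a next-frontier accumulator, instead of a FIFO queue carrying a depth in every entry.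
-- outside the precondition, e.g. on bfs([[(0, 1)], [], [(9, 9)]], 2, 0): A returns ([1, 1], [2, 3]), B returns ([1, 1], [2, 3]); on bfs([[(0, -1)], []], 2, 1): A returns ([1, 2], [2, 3]), B returns ([1, 2], [2, 3])
import Mathlib
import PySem

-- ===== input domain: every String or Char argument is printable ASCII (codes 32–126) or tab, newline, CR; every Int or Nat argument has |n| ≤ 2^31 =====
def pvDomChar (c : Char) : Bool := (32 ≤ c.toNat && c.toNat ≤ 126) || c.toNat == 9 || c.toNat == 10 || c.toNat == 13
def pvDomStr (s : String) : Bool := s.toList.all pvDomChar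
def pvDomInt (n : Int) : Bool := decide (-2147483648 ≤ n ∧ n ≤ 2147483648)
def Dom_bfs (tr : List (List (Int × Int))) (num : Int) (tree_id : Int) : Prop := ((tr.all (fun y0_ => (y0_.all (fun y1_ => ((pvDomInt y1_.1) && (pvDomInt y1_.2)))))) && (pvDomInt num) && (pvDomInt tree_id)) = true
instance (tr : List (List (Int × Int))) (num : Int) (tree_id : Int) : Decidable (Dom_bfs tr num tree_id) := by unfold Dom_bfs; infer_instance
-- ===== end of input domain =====

-- B replaces A's FIFO deque of (node, depth) pairs by level-at-a-time frontier lists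
-- with a scalar depth counter (objective: alternative; same asymptotic cost).


-- ===== PORT A =====
-- Totality guard for the while-loop: pvSize counts (on admitted inputs) exactly the
-- number of queue pops A performs; it is not part of A's algorithm.
def pvSize (tr : List (List (Int × Int))) : Nat → Int → Nat
  | 0, _ => 1
  | k+1, u => 1 + ((PySem.List.pyGetD tr u []).map (fun e => pvSize tr k e.2)).sum

-- while q: u, dep = q.popleft(); depths[u] = dep; for idx, v in enumerate(tr[u], 1): …
def bfsLoop (tr : List (List (Int × Int))) : Nat → List (Int × Int) → List Int × List Int → List Int × List Int
  | 0, _, st => st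
  | _+1, [], st => st
  | fuel+1, (u, dep) :: q, st =>
      let depths := PySem.List.pySetD st.2 u dep
      let r := (PySem.List.pyGetD tr u []).foldl
          (fun (s : Int × List Int × List (Int × Int)) v =>
            (s.1 + 1, PySem.List.pySetD s.2.1 v.1 s.1, s.2.2 ++ [(v.2, dep + 1)]))
          (1, st.1, q)
      bfsLoop tr fuel r.2.2 (r.2.1, depths)

def bfs (tr : List (List (Int × Int))) (num : Int) (tree_id : Int) : List Int × List Int :=
  let st := bfsLoop tr (pvSize tr tr.length 0) [(0, 2)]
      (List.replicate (num - 1).toNat 0, List.replicate num.toNat 0)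
  (if tree_id ≠ -1 then st.1 ++ [tree_id + 1] else st.1, st.2)

-- ===== PORT B =====
-- body of `for u in frontier:` — acc = ((indexes, depths), nxt)
def bfsNode (tr : List (List (Int × Int))) (dep : Int)
    (acc : (List Int × List Int) × List Int) (u : Int) : (List Int × List Int) × List Int :=
  let depths := PySem.List.pySetD acc.1.2 u dep
  let r := (PySem.List.pyGetD tr u []).foldl
      (fun (s : Int × List Int × List Int) v =>
        (s.1 + 1, PySem.List.pySetD s.2.1 v.1 s.1, s.2.2 ++ [v.2]))
      (1, acc.1.1, acc.2)
  ((r.2.1, depths), r.2.2)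

-- while frontier: … frontier, dep = nxt, dep + 1  (same totality guard)
def bfsLoopB (tr : List (List (Int × Int))) : Nat → List Int → Int → List Int × List Int → List Int × List Int
  | 0, _, _, st => st
  | _+1, [], _, st => st
  | fuel+1, u :: f, dep, st =>
      let r := (u :: f).foldl (bfsNode tr dep) (st, [])
      bfsLoopB tr fuel r.2 (dep + 1) r.1

def bfs_alt (tr : List (List (Int × Int))) (num : Int) (tree_id : Int) : List Int × List Int :=
  let st := bfsLoopB tr (pvSize tr tr.length 0) [0] 2
      (List.replicate (num - 1).toNat 0, List.replicate num.toNat 0)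
  (if tree_id ≠ -1 then st.1 ++ [tree_id + 1] else st.1, st.2)

-- ===== PRECONDITION & SPEC =====
-- Pre_ is conservative: besides excluding the inputs where A raises (num < 1, empty tr,
-- out-of-range node/edge indices) or loops forever (a cycle), it requires — whenever the
-- root row is nonempty — a globally well-formed upward tree (length num, every edge
-- (a, b) of row u with 0 ≤ a < num-1 and u < b < num); this also excludes some inputs on
-- which A returns, namely those whose UNREACHABLE rows are malformed or whose reachable
-- part works only through Python's negative-index wraparound (see the cited examples;
-- the Python B agrees with A there too, but the claim does not cover them).
def Pre_bfs (tr : List (List (Int × Int))) (num : Int) (tree_id : Int) : Prop :=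
  1 ≤ num ∧ tr ≠ [] ∧
    (tr.head? = some [] ∨
      ((tr.length : Int) = num ∧ ∀ u : Nat, ∀ _ : u < tr.length, ∀ e ∈ tr[u],
        0 ≤ e.1 ∧ e.1 < num - 1 ∧ (u : Int) < e.2 ∧ e.2 < num))
instance (tr : List (List (Int × Int))) (num : Int) (tree_id : Int) : Decidable (Pre_bfs tr num tree_id) := by unfold Pre_bfs; infer_instance

def pvWitness_bfs : (List (List (Int × Int))) × Int × Int := ([[(0, 1)], []], 2, 0)

def Spec_bfs (tr : List (List (Int × Int))) (num : Int) (tree_id : Int) (out : List Int × List Int) : Prop := out = bfs_alt tr num tree_id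
instance (tr : List (List (Int × Int))) (num : Int) (tree_id : Int) (out : List Int × List Int) : Decidable (Spec_bfs tr num tree_id out) := by unfold Spec_bfs; infer_instance

-- ===== CLAIM (what is proved, stated in full; the proofs are below) =====
def Claim_equal_bfs : Prop := ∀ (tr : List (List (Int × Int))) (num : Int) (tree_id : Int), Dom_bfs tr num tree_id → Pre_bfs tr num tree_id → Spec_bfs tr num tree_id (bfs tr num tree_id)

-- ===== LEMMAS AND PROOFS =====

-- children of node u, and the writes both ports perform when processing u at depth dep
def chl (tr : List (List (Int × Int))) (u : Int) : List Int :=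
  (PySem.List.pyGetD tr u []).map Prod.snd

def ixFold (row : List (Int × Int)) (s : Int × List Int) : Int × List Int :=
  row.foldl (fun s v => (s.1 + 1, PySem.List.pySetD s.2 v.1 s.1)) s

def wrN (tr : List (List (Int × Int))) (dep : Int) (st : List Int × List Int) (u : Int) :
    List Int × List Int :=
  ((ixFold (PySem.List.pyGetD tr u []) (1, st.1)).2, PySem.List.pySetD st.2 u dep)

def SZ (tr : List (List (Int × Int))) (u : Int) : Nat := pvSize tr tr.length u

def Phi (tr : List (List (Int × Int))) (f : List Int) : Nat := (f.map (SZ tr)).sum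

def GoodT (tr : List (List (Int × Int))) (num : Int) : Prop :=
  (tr.length : Int) = num ∧ ∀ u : Nat, ∀ _ : u < tr.length, ∀ e ∈ tr[u],
    0 ≤ e.1 ∧ e.1 < num - 1 ∧ (u : Int) < e.2 ∧ e.2 < num

theorem row_eq (tr : List (List (Int × Int))) (u : Int) (h0 : 0 ≤ u)
    (hlt : u < (tr.length : Int)) :
    PySem.List.pyGetD tr u [] = tr[u.toNat]'(by omega) :=
  PySem.List.pyGetD_eq_getElem tr [] h0 hlt

theorem foldA_eq (dep : Int) : ∀ (row : List (Int × Int)) (i : Int) (ixs : List Int) (q : List (Int × Int)),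
    row.foldl (fun (s : Int × List Int × List (Int × Int)) v =>
        (s.1 + 1, PySem.List.pySetD s.2.1 v.1 s.1, s.2.2 ++ [(v.2, dep + 1)])) (i, ixs, q)
      = ((ixFold row (i, ixs)).1, (ixFold row (i, ixs)).2,
         q ++ row.map (fun v => (v.2, dep + 1)))
  | [], i, ixs, q => by simp [ixFold]
  | v :: row, i, ixs, q => by
      simp only [List.foldl_cons, ixFold, List.map_cons]
      rw [foldA_eq dep row]
      simp [ixFold]

theorem foldB_eq : ∀ (row : List (Int × Int)) (i : Int) (ixs nxt : List Int),
    row.foldl (fun (s : Int × List Int × List Int) v =>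
        (s.1 + 1, PySem.List.pySetD s.2.1 v.1 s.1, s.2.2 ++ [v.2])) (i, ixs, nxt)
      = ((ixFold row (i, ixs)).1, (ixFold row (i, ixs)).2, nxt ++ row.map Prod.snd)
  | [], i, ixs, nxt => by simp [ixFold]
  | v :: row, i, ixs, nxt => by
      simp only [List.foldl_cons, ixFold, List.map_cons]
      rw [foldB_eq row]
      simp [ixFold]

theorem bfsNode_eq (tr : List (List (Int × Int))) (dep : Int)
    (p : (List Int × List Int) × List Int) (u : Int) :
    bfsNode tr dep p u = (wrN tr dep p.1 u, p.2 ++ chl tr u) := by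
  simp [bfsNode, wrN, chl, foldB_eq]

theorem foldB_acc (tr : List (List (Int × Int))) (dep : Int) :
    ∀ (f : List Int) (st : List Int × List Int) (acc : List Int),
    f.foldl (bfsNode tr dep) (st, acc)
      = (f.foldl (wrN tr dep) st, acc ++ f.flatMap (chl tr))
  | [], st, acc => by simp
  | u :: f, st, acc => by
      simp only [List.foldl_cons, bfsNode_eq, List.flatMap_cons]
      rw [foldB_acc tr dep f]
      simp

theorem loopA_nil (tr : List (List (Int × Int))) (fuel : Nat) (st : List Int × List Int) :
    bfsLoop tr fuel [] st = st := by cases fuel <;> simp [bfsLoop]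

theorem levelA (tr : List (List (Int × Int))) (d : Int) :
    ∀ (f n : List Int) (st : List Int × List Int) (fuel : Nat),
    bfsLoop tr (fuel + f.length)
        (f.map (fun u => (u, d)) ++ n.map (fun u => (u, d + 1))) st
      = bfsLoop tr fuel ((n ++ f.flatMap (chl tr)).map (fun u => (u, d + 1)))
          (f.foldl (wrN tr d) st)
  | [], n, st, fuel => by simp
  | u :: f, n, st, fuel => by
      have h1 : fuel + (u :: f).length = (fuel + f.length) + 1 := by
        simp [List.length_cons]; omega
      rw [h1]
      show bfsLoop tr ((fuel + f.length) + 1)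
          ((u, d) :: (f.map (fun u => (u, d)) ++ n.map (fun u => (u, d + 1)))) st = _
      rw [bfsLoop]
      simp only [foldA_eq]
      have hq : (f.map (fun u => (u, d)) ++ n.map (fun u => (u, d + 1)))
            ++ (PySem.List.pyGetD tr u []).map (fun v => (v.2, d + 1))
          = f.map (fun u => (u, d)) ++ (n ++ chl tr u).map (fun u => (u, d + 1)) := by
        simp [chl, List.map_map, List.append_assoc]
      rw [hq]
      rw [levelA tr d f (n ++ chl tr u) _ fuel]
      simp only [List.foldl_cons]
      have : (n ++ chl tr u) ++ f.flatMap (chl tr) = n ++ (u :: f).flatMap (chl tr) := by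
        simp [List.append_assoc]
      rw [this]
      rfl

theorem one_le_pvSize (tr : List (List (Int × Int))) (k : Nat) (u : Int) :
    1 ≤ pvSize tr k u := by cases k <;> simp [pvSize]

theorem pvSize_stable (tr : List (List (Int × Int))) (num : Int) (hg : GoodT tr num) :
    ∀ (k₁ k₂ : Nat) (u : Int), 0 ≤ u → u < (tr.length : Int) →
    tr.length - u.toNat ≤ k₁ → tr.length - u.toNat ≤ k₂ →
    pvSize tr k₁ u = pvSize tr k₂ u := by
  intro k₁
  induction k₁ with
  | zero => intro k₂ u h0 hlt h1 _; exfalso; omega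
  | succ a ih =>
      intro k₂ u h0 hlt h1 h2
      obtain ⟨b, rfl⟩ : ∃ b, k₂ = b + 1 := by
        cases k₂ with
        | zero => exfalso; omega
        | succ b => exact ⟨b, rfl⟩
      have hun : u.toNat < tr.length := by omega
      rw [pvSize, pvSize, row_eq tr u h0 hlt]
      congr 1
      refine congrArg List.sum (List.map_congr_left ?_)
      intro e he
      have hc := hg.2 u.toNat hun e he
      have hlen : (tr.length : Int) = num := hg.1
      have hb0 : 0 ≤ e.2 := by omega
      have hblt : e.2 < (tr.length : Int) := by omega
      have hgt : (u.toNat : Int) < e.2 := hc.2.2.1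
      have : tr.length - e.2.toNat ≤ a := by omega
      exact ih b e.2 hb0 hblt this (by omega)

theorem SZ_eq (tr : List (List (Int × Int))) (num : Int) (hg : GoodT tr num) (u : Int)
    (h0 : 0 ≤ u) (hlt : u < (tr.length : Int)) :
    SZ tr u = 1 + Phi tr (chl tr u) := by
  obtain ⟨m, hm⟩ : ∃ m, tr.length = m + 1 := by
    have : 0 < tr.length := by omega
    exact ⟨tr.length - 1, by omega⟩
  unfold SZ
  rw [hm, pvSize]
  congr 1
  simp only [Phi, chl, List.map_map]
  refine congrArg List.sum (List.map_congr_left ?_)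
  intro e he
  have hun : u.toNat < tr.length := by omega
  rw [row_eq tr u h0 hlt] at he
  have hc := hg.2 u.toNat hun e he
  have hb0 : 0 ≤ e.2 := by omega
  have hblt : e.2 < (tr.length : Int) := by have := hg.1; omega
  have hgt : (u.toNat : Int) < e.2 := hc.2.2.1
  show pvSize tr m e.2 = SZ tr (Prod.snd e)
  unfold SZ
  exact pvSize_stable tr num hg m tr.length e.2 hb0 hblt (by omega) (by omega)

theorem length_le_Phi (tr : List (List (Int × Int))) :
    ∀ f : List Int, f.length ≤ Phi tr f
  | [] => by simp [Phi]
  | u :: f => by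
      have h1 : 1 ≤ SZ tr u := one_le_pvSize tr tr.length u
      have h2 := length_le_Phi tr f
      simp only [Phi, List.map_cons, List.sum_cons, List.length_cons]
      simp only [Phi] at h2
      omega

theorem Phi_append (tr : List (List (Int × Int))) (f g : List Int) :
    Phi tr (f ++ g) = Phi tr f + Phi tr g := by simp [Phi]

theorem Phi_good (tr : List (List (Int × Int))) (num : Int) (hg : GoodT tr num) :
    ∀ f : List Int, (∀ u ∈ f, 0 ≤ u ∧ u < (tr.length : Int)) →
    Phi tr f = f.length + Phi tr (f.flatMap (chl tr))
  | [], _ => by simp [Phi]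
  | u :: f, hf => by
      have hu := hf u (by simp)
      have h1 : Phi tr (u :: f) = SZ tr u + Phi tr f := by simp [Phi]
      rw [h1, SZ_eq tr num hg u hu.1 hu.2,
        Phi_good tr num hg f (fun v hv => hf v (by simp [hv]))]
      simp only [List.flatMap_cons, Phi_append, List.length_cons]
      omega

theorem chl_NV (tr : List (List (Int × Int))) (num : Int) (hg : GoodT tr num) (u : Int)
    (h0 : 0 ≤ u) (hlt : u < (tr.length : Int)) :
    ∀ v ∈ chl tr u, 0 ≤ v ∧ v < (tr.length : Int) := by
  intro v hv
  have hun : u.toNat < tr.length := by omega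
  unfold chl at hv
  rw [row_eq tr u h0 hlt] at hv
  obtain ⟨e, he, rfl⟩ := List.mem_map.1 hv
  have hc := hg.2 u.toNat hun e he
  have := hg.1
  constructor <;> omega

theorem mainM (tr : List (List (Int × Int))) (num : Int) (hg : GoodT tr num) :
    ∀ (fB : Nat) (f : List Int) (d : Int) (st : List Int × List Int) (fA : Nat),
    (∀ u ∈ f, 0 ≤ u ∧ u < (tr.length : Int)) →
    Phi tr f ≤ fA → Phi tr f ≤ fB →
    bfsLoop tr fA (f.map (fun u => (u, d))) st = bfsLoopB tr fB f d st := by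
  intro fB
  induction fB with
  | zero =>
      intro f d st fA hf h1 h2
      have : f.length = 0 := by have := length_le_Phi tr f; omega
      have hf0 : f = [] := List.length_eq_zero_iff.1 this
      subst hf0
      simp [loopA_nil, bfsLoopB]
  | succ b ih =>
      intro f d st fA hf h1 h2
      cases f with
      | nil => simp [loopA_nil, bfsLoopB]
      | cons u f =>
          have hΦ : Phi tr (u :: f) = (u :: f).length + Phi tr ((u :: f).flatMap (chl tr)) :=
            Phi_good tr num hg (u :: f) hf
          have hlenA : (u :: f).length ≤ fA := by
            have := length_le_Phi tr (u :: f); omega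
          -- B side: one level
          rw [bfsLoopB]
          simp only [foldB_acc]
          -- A side: process the whole level
          have hfA : fA = (fA - (u :: f).length) + (u :: f).length := by omega
          rw [hfA]
          have hlev := levelA tr d (u :: f) [] st (fA - (u :: f).length)
          simp only [List.map_nil, List.append_nil, List.nil_append] at hlev
          rw [hlev]
          have hlc : (u :: f).length = f.length + 1 := rfl
          apply ih
          · intro v hv
            obtain ⟨p, hp, hvp⟩ := List.mem_flatMap.1 hv
            have hpv := hf p hp
            exact chl_NV tr num hg p hpv.1 hpv.2 v hvp
          · omega
          · omega

-- ===== VERDICT (by name: the statement is the Claim_ definition above) =====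
theorem bfs_spec : Claim_equal_bfs := by
  intro tr num tree_id _ hpre
  unfold Spec_bfs
  obtain ⟨hnum, hne, hcase⟩ := hpre
  cases hcase with
  | inl hroot =>
      obtain ⟨rest, rfl⟩ : ∃ rest, tr = [] :: rest := by
        cases tr with
        | nil => exact absurd rfl hne
        | cons r rest =>
            simp only [List.head?_cons, Option.some.injEq] at hroot
            exact ⟨rest, by rw [hroot]⟩
      simp [bfs, bfs_alt, pvSize, bfsLoop, bfsLoopB, bfsNode,
        PySem.List.pyGetD_zero_cons]
  | inr hgood =>
      have hg : GoodT tr num := hgood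
      have hlen : 0 < tr.length := by
        have := hg.1
        omega
      have hmain := mainM tr num hg (pvSize tr tr.length 0) [0] 2
        (List.replicate (num - 1).toNat 0, List.replicate num.toNat 0)
        (pvSize tr tr.length 0)
        (by intro u hu; simp at hu; subst hu; constructor <;> [norm_num; exact_mod_cast hlen])
        (by simp [Phi, SZ]) (by simp [Phi, SZ])
      simp only [List.map_cons, List.map_nil] at hmain
      unfold bfs bfs_alt
      rw [hmain]
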